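-- pv_equiv track=rewrite | github.com/BOSEON-SEO/coupang-supplier-electron-automation | python/scripts/shipment_register.py | _parse_invoices
-- ===== SOURCE A (Python) =====
-- def _parse_invoices(raw: str) -> list[str]:
--     """개행/쉼표 혼용 파싱 → 최대 9개 trim."""
--     if not raw:
--         return []
--     parts = []
--     for chunk in raw.replace("\r", "\n").split("\n"):
--         for item in chunk.split(","):
--             item = item.strip()
--             if item:
--                 parts.append(item)
--             if len(parts) >= 9:
--                 break
--         if len(parts) >= 9:
--             break
--     return parts[:9]
-- ===== SOURCE B (Python) =====
-- def _parse_invoices(raw: str) -> list[str]: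
--     """Single char-level pass: accumulate a token, flush on any of \r \n ,; stop at 9."""
--     parts = []
--     buf = []
--     for ch in raw + "\n":
--         if ch in "\r\n,":
--             tok = "".join(buf).strip()
--             buf = []
--             if tok:
--                 parts.append(tok)
--                 if len(parts) == 9:
--                     return parts
--         else:
--             buf.append(ch)
--     return parts
-- ===== Notes on version B (the rewrite author's own statement) =====
-- stated objective: alternative
-- what changed: Replaces A's nested split-on-newlines-then-split-on-commas loops over intermediate chunk lists with one flat character-level scan that accumulates a token buffer, flushes it at each delimiter character, and stops as soon as 9 tokens are found.
import Mathlib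
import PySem

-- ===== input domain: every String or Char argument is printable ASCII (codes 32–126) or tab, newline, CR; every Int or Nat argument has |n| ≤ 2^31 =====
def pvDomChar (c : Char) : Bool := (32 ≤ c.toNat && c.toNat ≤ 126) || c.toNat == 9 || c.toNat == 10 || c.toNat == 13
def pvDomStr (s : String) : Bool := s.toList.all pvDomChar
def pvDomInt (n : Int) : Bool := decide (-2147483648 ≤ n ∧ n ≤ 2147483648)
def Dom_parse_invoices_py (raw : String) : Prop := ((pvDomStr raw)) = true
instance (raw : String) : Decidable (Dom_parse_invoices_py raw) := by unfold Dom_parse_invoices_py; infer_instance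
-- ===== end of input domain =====

-- B replaces A's nested split('\n')/split(',') loops by one flat character scan with a token
-- buffer flushed at each delimiter; same return value, no speed claim (objective: alternative).

-- ===== PORT A =====
-- s.split(sep) for a nonempty literal sep (= PySem.Str.split?, which is `none` only for sep = "")
def pvSplitStr (s sep : String) : List String :=
  (PySem.Chars.splitOn s.toList sep.toList).map String.ofList

-- inner `for item in chunk.split(",")` loop of A, with its two `break`s
def pvInnerA : List String → List String → List String
  | [], parts => parts
  | item :: rest, parts =>
    let it := PySem.Str.strip item
    let parts' := if it ≠ "" then parts ++ [it] else parts
    if 9 ≤ parts'.length then parts' else pvInnerA rest parts'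

-- outer `for chunk in …` loop of A
def pvOuterA : List String → List String → List String
  | [], parts => parts
  | chunk :: rest, parts =>
    let parts' := pvInnerA (pvSplitStr chunk ",") parts
    if 9 ≤ parts'.length then parts' else pvOuterA rest parts'

def parse_invoices_py (raw : String) : List String :=
  if raw = "" then []
  else (pvOuterA (pvSplitStr (PySem.Str.replace raw "\r" "\n") "\n") []).take 9

-- ===== PORT B =====
-- the single `for ch in raw + "\n"` loop of Source B: buf is the pending token, parts the result
def pvAltLoop : List Char → List Char → List String → List String
  | [], _, parts => parts
  | c :: rest, buf, parts =>
    if c = '\r' ∨ c = '\n' ∨ c = ',' then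
      let tok := PySem.Str.strip (String.ofList buf)
      if tok ≠ "" then
        let parts' := parts ++ [tok]
        if parts'.length = 9 then parts' else pvAltLoop rest [] parts'
      else pvAltLoop rest [] parts
    else pvAltLoop rest (buf ++ [c]) parts

def parse_invoices_py_alt (raw : String) : List String :=
  pvAltLoop (raw.toList ++ ['\n']) [] []

-- ===== PRECONDITION & SPEC =====
def Spec_parse_invoices_py (raw : String) (out : List String) : Prop := out = parse_invoices_py_alt raw
instance (raw : String) (out : List String) : Decidable (Spec_parse_invoices_py raw out) := by unfold Spec_parse_invoices_py; infer_instance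

-- ===== CLAIM (what is proved, stated in full; the proofs are below) =====
def Claim_equal_parse_invoices_py : Prop := ∀ (raw : String), Dom_parse_invoices_py raw → Spec_parse_invoices_py raw (parse_invoices_py raw)

-- ===== LEMMAS AND PROOFS =====

-- `raw.replace("\r", "\n")` as a character map
def pvF (c : Char) : Char := if c = '\r' then '\n' else c

-- split of a char list at every char satisfying p (keeps empty pieces, Python split semantics)
def pvSplitP (p : Char → Bool) : List Char → List (List Char)
  | [] => [[]]
  | c :: t => if p c then [] :: pvSplitP p t else (pvSplitP p t).modifyHead (c :: ·)

def pvDelim (c : Char) : Bool := c == '\r' || c == '\n' || c == ','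

-- the completed (delimiter-terminated) pieces of buf ++ cs, mirroring B's buffer
def pvSegs : List Char → List Char → List (List Char)
  | _, [] => []
  | buf, c :: rest => if pvDelim c then buf :: pvSegs [] rest else pvSegs (buf ++ [c]) rest

-- strip each piece, keep the nonempty ones, as Strings
def pvToksC (ls : List (List Char)) : List String :=
  ((ls.map PySem.Chars.strip).filter (· ≠ [])).map String.ofList

def pvToksS (items : List String) : List String :=
  (items.map PySem.Str.strip).filter (· ≠ "")

theorem pvSplitP_ne_nil (p : Char → Bool) (l : List Char) : pvSplitP p l ≠ [] := by
  cases l with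
  | nil => simp [pvSplitP]
  | cons c t =>
    simp only [pvSplitP]
    split
    · simp
    · cases h : pvSplitP p t with
      | nil => exact absurd h (pvSplitP_ne_nil p t)
      | cons a b => simp

theorem pv_replace_go (fuel : Nat) (l acc : List Char) (h : l.length ≤ fuel) :
    PySem.Chars.replace.go ['\r'] ['\n'] fuel l acc = acc.reverse ++ l.map pvF := by
  induction fuel generalizing l acc with
  | zero =>
    cases l with
    | nil => simp [PySem.Chars.replace.go]
    | cons c t => simp at h
  | succ n ih =>
    cases l with
    | nil => simp [PySem.Chars.replace.go]
    | cons c t =>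
      simp only [PySem.Chars.replace.go]
      by_cases hc : c = '\r'
      · subst hc
        rw [if_pos (by simp [List.isPrefixOf])]
        simp only [List.length_cons] at h
        rw [show List.drop ['\r'].length ('\r' :: t) = t from rfl, ih _ _ (by omega)]
        simp [pvF]
      · rw [if_neg (by simp [List.isPrefixOf]; intro h'; exact absurd h'.symm hc)]
        simp only [List.length_cons] at h
        rw [ih _ _ (by omega)]
        simp [pvF, hc]

theorem pv_replace (l : List Char) :
    PySem.Chars.replace l ['\r'] ['\n'] = l.map pvF := by
  simp [PySem.Chars.replace, pv_replace_go l.length l [] le_rfl]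

theorem pv_splitOn_go (d : Char) (fuel : Nat) (l cur : List Char) (acc : List (List Char))
    (h : l.length ≤ fuel) :
    PySem.Chars.splitOn.go [d] fuel l cur acc
      = acc.reverse ++ (pvSplitP (· == d) l).modifyHead (cur.reverse ++ ·) := by
  induction fuel generalizing l cur acc with
  | zero =>
    cases l with
    | nil => simp [PySem.Chars.splitOn.go, pvSplitP]
    | cons c t => simp at h
  | succ n ih =>
    cases l with
    | nil => simp [PySem.Chars.splitOn.go, pvSplitP]
    | cons c t =>
      simp only [PySem.Chars.splitOn.go]
      by_cases hc : c = d
      · subst hc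
        rw [if_pos (by simp [List.isPrefixOf])]
        simp only [List.length_cons] at h
        rw [show List.drop [c].length (c :: t) = t from rfl, ih _ _ _ (by omega)]
        cases ht : pvSplitP (· == c) t with
        | nil => exact absurd ht (pvSplitP_ne_nil _ t)
        | cons a b => simp [pvSplitP, ht]
      · rw [if_neg (by simp [List.isPrefixOf]; intro h'; exact absurd h'.symm hc)]
        simp only [List.length_cons] at h
        rw [ih _ _ _ (by omega)]
        cases ht : pvSplitP (· == d) t with
        | nil => exact absurd ht (pvSplitP_ne_nil _ t)
        | cons a b => simp [pvSplitP, hc, ht]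

theorem pv_splitOn (d : Char) (l : List Char) :
    PySem.Chars.splitOn l [d] = pvSplitP (· == d) l := by
  rw [PySem.Chars.splitOn, pv_splitOn_go d (l.length + 1) l [] [] (by omega)]
  cases ht : pvSplitP (· == d) l with
  | nil => exact absurd ht (pvSplitP_ne_nil _ l)
  | cons a b => simp

-- nested split(',') over the pieces of split('\n') of the '\r'→'\n'-mapped string
-- is the flat split on the three delimiters
theorem pv_nest (l : List Char) :
    (pvSplitP (· == '\n') (l.map pvF)).flatMap (pvSplitP (· == ',')) = pvSplitP pvDelim l := by
  induction l with
  | nil => simp [pvSplitP]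
  | cons c t ih =>
    by_cases hnl : (c = '\r' ∨ c = '\n')
    · have hf : pvF c = '\n' := by rcases hnl with h|h <;> simp [pvF, h]
      have hd : pvDelim c = true := by rcases hnl with h|h <;> simp [pvDelim, h]
      simp [pvSplitP, hf, hd, List.flatMap_cons, ih]
    · push Not at hnl
      have hf : pvF c = c := by simp [pvF, hnl.1]
      obtain ⟨a, b, ht⟩ : ∃ a b, pvSplitP (· == '\n') (t.map pvF) = a :: b := by
        cases h : pvSplitP (· == '\n') (t.map pvF) with
        | nil => exact absurd h (pvSplitP_ne_nil _ _)
        | cons a b => exact ⟨a, b, rfl⟩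
      rw [ht] at ih
      simp only [List.flatMap_cons] at ih
      by_cases hcm : c = ','
      · subst hcm
        simp [pvSplitP, pvF, pvDelim, ht, ih]
      · have hd : pvDelim c = false := by simp [pvDelim, hnl.1, hnl.2, hcm]
        obtain ⟨x, y, ha⟩ : ∃ x y, pvSplitP (· == ',') a = x :: y := by
          cases h : pvSplitP (· == ',') a with
          | nil => exact absurd h (pvSplitP_ne_nil _ _)
          | cons x y => exact ⟨x, y, rfl⟩
        obtain ⟨u, v, hu⟩ : ∃ u v, pvSplitP pvDelim t = u :: v := by
          cases h : pvSplitP pvDelim t with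
          | nil => exact absurd h (pvSplitP_ne_nil _ _)
          | cons u v => exact ⟨u, v, rfl⟩
        simp only [ha, hu, List.cons_append] at ih
        injection ih with h1 h2
        simp [pvSplitP, hf, hd, hnl.2, hcm, ht, ha, hu, List.flatMap_cons, h1, h2]

theorem pvToksC_append (xs ys : List (List Char)) :
    pvToksC (xs ++ ys) = pvToksC xs ++ pvToksC ys := by
  simp [pvToksC]

theorem pvToksC_cons (h : List Char) (t : List (List Char)) :
    pvToksC (h :: t) = if PySem.Chars.strip h ≠ [] then
      String.ofList (PySem.Chars.strip h) :: pvToksC t else pvToksC t := by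
  by_cases hh : PySem.Chars.strip h = [] <;> simp [pvToksC, hh]


theorem pvToksS_cons (a : String) (t : List String) :
    pvToksS (a :: t) = if PySem.Str.strip a ≠ "" then PySem.Str.strip a :: pvToksS t else pvToksS t := by
  by_cases h : PySem.Str.strip a = "" <;> simp [pvToksS, h]

theorem pv_strip_eq_empty_iff (a : String) :
    PySem.Str.strip a = "" ↔ PySem.Chars.strip a.toList = [] := by
  constructor
  · intro h
    have := congrArg String.toList h
    rwa [PySem.Str.toList_strip] at this
  · intro h
    show String.ofList (PySem.Chars.strip a.toList) = ""
    rw [h]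

theorem pvToksS_eq (items : List String) :
    pvToksS items = pvToksC (items.map String.toList) := by
  induction items with
  | nil => rfl
  | cons a t ih =>
    rw [List.map_cons, pvToksC_cons, pvToksS_cons]
    by_cases ha : PySem.Chars.strip a.toList = []
    · rw [if_neg (by simp [(pv_strip_eq_empty_iff a).mpr ha]), if_neg (by simp [ha]), ih]
    · rw [if_pos (by simp [pv_strip_eq_empty_iff, ha]), if_pos (by simp [ha]), ih,
        show PySem.Str.strip a = String.ofList (PySem.Chars.strip a.toList) from rfl]

theorem pvInnerA_eq (items : List String) (parts : List String) (h : parts.length < 9) :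
    pvInnerA items parts = (parts ++ pvToksS items).take 9 := by
  induction items generalizing parts with
  | nil => simp [pvInnerA, pvToksS, List.take_of_length_le (Nat.le_of_lt h)]
  | cons item rest ih =>
    rw [pvToksS_cons]
    by_cases hi : PySem.Str.strip item = ""
    · simp only [pvInnerA]
      simp [hi, show ¬ 9 ≤ parts.length from by omega, ih parts h]
    · rw [if_pos (by simp [hi])]
      by_cases h9 : parts.length + 1 = 9
      · simp only [pvInnerA]
        simp [hi, h9]
        rw [show parts ++ PySem.Str.strip item :: pvToksS rest
              = (parts ++ [PySem.Str.strip item]) ++ pvToksS rest from by simp,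
          List.take_append]
        simp [List.take_of_length_le, h9]
      · simp only [pvInnerA]
        simp [hi, show ¬ 8 ≤ parts.length from by omega]
        rw [ih _ (by simp; omega)]
        simp

theorem pvSplitStr_toList (s : String) (d : Char) (sep : String) (hsep : sep.toList = [d]) :
    (pvSplitStr s sep).map String.toList = pvSplitP (· == d) s.toList := by
  rw [pvSplitStr, hsep, pv_splitOn, List.map_map]
  simp [Function.comp_def]

theorem pvOuterA_eq (chunks : List String) (parts : List String) (h : parts.length < 9) :
    pvOuterA chunks parts
      = (parts ++ pvToksC ((chunks.map String.toList).flatMap (pvSplitP (· == ',')))).take 9 := by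
  induction chunks generalizing parts with
  | nil => simp [pvOuterA, pvToksC, List.take_of_length_le (Nat.le_of_lt h)]
  | cons chunk rest ih =>
    simp only [pvOuterA]
    have htoks : pvToksS (pvSplitStr chunk ",") = pvToksC (pvSplitP (· == ',') chunk.toList) := by
      rw [pvToksS_eq, pvSplitStr_toList chunk ',' "," rfl]
    rw [pvInnerA_eq _ _ h, htoks]
    rw [show pvToksC (((chunk :: rest).map String.toList).flatMap (pvSplitP (· == ',')))
          = pvToksC (pvSplitP (· == ',') chunk.toList)
            ++ pvToksC ((rest.map String.toList).flatMap (pvSplitP (· == ','))) from by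
        simp only [List.map_cons, List.flatMap_cons, pvToksC_append]]
    set T := pvToksC (pvSplitP (· == ',') chunk.toList) with hT
    set R := pvToksC ((rest.map String.toList).flatMap (pvSplitP (· == ','))) with hR
    by_cases h9 : 9 ≤ ((parts ++ T).take 9).length
    · rw [if_pos h9]
      have hlen : 9 ≤ (parts ++ T).length := by
        simpa [List.length_take] using h9
      rw [show parts ++ (T ++ R) = (parts ++ T) ++ R from by simp,
        List.take_append_of_le_length hlen]
    · rw [if_neg h9]
      have hlt : (parts ++ T).length < 9 := by
        simp [List.length_take, List.length_append] at h9 ⊢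
        omega
      rw [List.take_of_length_le (Nat.le_of_lt hlt), ih _ hlt]
      simp

theorem pvAltLoop_eq (cs buf : List Char) (parts : List String) (h : parts.length < 9) :
    pvAltLoop cs buf parts = (parts ++ pvToksC (pvSegs buf cs)).take 9 := by
  induction cs generalizing buf parts with
  | nil => simp [pvAltLoop, pvSegs, pvToksC, List.take_of_length_le (Nat.le_of_lt h)]
  | cons c rest ih =>
    by_cases hd : c = '\r' ∨ c = '\n' ∨ c = ','
    · have hsegs : pvSegs buf (c :: rest) = buf :: pvSegs [] rest := by
        simp only [pvSegs]
        rw [if_pos (by rcases hd with h'|h'|h' <;> simp [pvDelim, h'])]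
      rw [hsegs, pvToksC_cons]
      have hstr : PySem.Str.strip (String.ofList buf) = String.ofList (PySem.Chars.strip buf) := by
        show String.ofList (PySem.Chars.strip (String.ofList buf).toList) = _
        rw [String.toList_ofList]
      by_cases hb : PySem.Chars.strip buf = []
      · have hemp : PySem.Str.strip (String.ofList buf) = "" := by rw [hstr, hb]
        simp only [pvAltLoop]
        rw [if_pos hd]
        simp [hemp, hb, ih [] parts h]
      · have hne : PySem.Str.strip (String.ofList buf) ≠ "" := by
          rw [hstr]
          intro he
          exact hb (by simpa using congrArg String.toList he)
        simp only [pvAltLoop]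
        rw [if_pos hd]
        by_cases h9 : parts.length + 1 = 9
        · simp [h9, hstr, hb]
          rw [show parts ++ String.ofList (PySem.Chars.strip buf) :: pvToksC (pvSegs [] rest)
                = (parts ++ [String.ofList (PySem.Chars.strip buf)]) ++ pvToksC (pvSegs [] rest) from by
              simp,
            List.take_append]
          simp [h9]
        · simp [h9, hstr, hb]
          rw [ih [] _ (by simp; omega)]
          simp
    · have hsegs : pvSegs buf (c :: rest) = pvSegs (buf ++ [c]) rest := by
        simp only [pvSegs]
        rw [if_neg (by push Not at hd; simp [pvDelim, hd.1, hd.2.1, hd.2.2])]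
      simp only [pvAltLoop]
      rw [if_neg hd, ih _ _ h, hsegs]

theorem pvSegs_append_nl (cs buf : List Char) :
    pvSegs buf (cs ++ ['\n']) = (pvSplitP pvDelim cs).modifyHead (buf ++ ·) := by
  induction cs generalizing buf with
  | nil => simp [pvSegs, pvSplitP, pvDelim]
  | cons c t ih =>
    simp only [List.cons_append, pvSegs, pvSplitP]
    by_cases hd : pvDelim c = true
    · rw [if_pos hd, if_pos hd, ih]
      cases ht : pvSplitP pvDelim t with
      | nil => exact absurd ht (pvSplitP_ne_nil _ _)
      | cons a b => simp
    · rw [if_neg hd, if_neg hd, ih]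
      cases ht : pvSplitP pvDelim t with
      | nil => exact absurd ht (pvSplitP_ne_nil _ _)
      | cons a b => simp

theorem pvA_eq (raw : String) :
    parse_invoices_py raw = (pvToksC (pvSplitP pvDelim raw.toList)).take 9 := by
  by_cases h0 : raw = ""
  · subst h0
    simp [parse_invoices_py, pvSplitP, pvToksC, PySem.Chars.strip,
      PySem.Chars.lstrip, PySem.Chars.rstrip]
  · rw [parse_invoices_py, if_neg h0, pvOuterA_eq _ _ (by simp)]
    rw [pvSplitStr_toList _ '\n' "\n" rfl, PySem.Str.toList_replace,
      show ("\r" : String).toList = ['\r'] from rfl,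
      show ("\n" : String).toList = ['\n'] from rfl,
      pv_replace, pv_nest, List.nil_append, List.take_take]
    simp

theorem pvB_eq (raw : String) :
    parse_invoices_py_alt raw = (pvToksC (pvSplitP pvDelim raw.toList)).take 9 := by
  rw [parse_invoices_py_alt, pvAltLoop_eq _ _ _ (by simp), pvSegs_append_nl]
  cases ht : pvSplitP pvDelim raw.toList with
  | nil => exact absurd ht (pvSplitP_ne_nil _ _)
  | cons a b => simp

-- ===== VERDICT (by name: the statement is the Claim_ definition above) =====
theorem parse_invoices_py_spec : Claim_equal_parse_invoices_py := by
  intro raw _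
  unfold Spec_parse_invoices_py
  rw [pvA_eq, pvB_eq]
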